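-- pv_equiv track=rewrite | github.com/lavender-snow/my-codewars | 7kyu_TV_Remote.py | search
-- ===== SOURCE A (Python) =====
-- def search(c):
--     keyboard = [["a","b","c","d","e","1","2","3"],
--                 ["f","g","h","i","j","4","5","6"],
--                 ["k","l","m","n","o","7","8","9"],
--                 ["p","q","r","s","t",".","@","0"],
--                 ["u","v","w","x","y","z","_","/"]]
--     for i,row in enumerate(keyboard):
--         for j,key in enumerate(row):
--             if c == key:
--                  return [i,j]
--     return [-1,-1]
-- ===== SOURCE B (Python) =====
-- def search(c):
--     if len(c) != 1:
--         return [-1, -1]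
--     k = ord(c)
--     if ord('a') <= k <= ord('t'):
--         row, col = divmod(k - ord('a'), 5)
--         return [row, col]
--     if ord('u') <= k <= ord('z'):
--         return [4, k - ord('u')]
--     if ord('1') <= k <= ord('9'):
--         row, col = divmod(k - ord('1'), 3)
--         return [row, 5 + col]
--     specials = {'.': [3, 5], '@': [3, 6], '0': [3, 7], '_': [4, 6], '/': [4, 7]}
--     return specials.get(c, [-1, -1])
-- ===== Notes on version B (the rewrite author's own statement) =====
-- stated objective: alternative
-- what changed: Replaces A's linear scan of the 40-key table with closed-form coordinate arithmetic on ord(c) for letters and digits (divmod by 5 resp. 3) plus a 5-entry dict for the symbols; no table is scanned.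
import Mathlib
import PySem

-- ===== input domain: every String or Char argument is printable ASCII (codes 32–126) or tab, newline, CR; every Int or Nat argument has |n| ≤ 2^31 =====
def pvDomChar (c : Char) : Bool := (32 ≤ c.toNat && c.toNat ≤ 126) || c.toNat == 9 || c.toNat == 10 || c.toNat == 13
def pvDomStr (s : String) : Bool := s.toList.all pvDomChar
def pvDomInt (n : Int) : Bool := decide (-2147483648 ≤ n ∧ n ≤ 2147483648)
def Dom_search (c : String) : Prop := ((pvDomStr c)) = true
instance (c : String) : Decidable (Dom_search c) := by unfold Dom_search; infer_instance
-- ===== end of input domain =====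

-- B replaces A's table scan by closed-form coordinate arithmetic on ord(c) (letters and digits)
-- plus a 5-entry dict for the symbols; objective: alternative algorithm, no speed claim.

-- ===== PORT A =====
-- enumerate(xs) with a running index (Int, as Python ints)
def pvEnumI {α : Type} (i : Int) : List α → List (Int × α)
  | [] => []
  | x :: xs => (i, x) :: pvEnumI (i + 1) xs

-- inner loop: for j,key in enumerate(row): if c == key: return [i,j]
def pvScanRow (c : String) (i : Int) : List (Int × String) → Option (List Int)
  | [] => none
  | (j, key) :: rest => if c = key then some [i, j] else pvScanRow c i rest

-- outer loop: for i,row in enumerate(keyboard)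
def pvScanRows (c : String) : List (Int × List String) → List Int
  | [] => [-1, -1]
  | (i, row) :: rest =>
      match pvScanRow c i (pvEnumI 0 row) with
      | some r => r
      | none => pvScanRows c rest

def search (c : String) : List Int :=
  let keyboard : List (List String) :=
    [["a","b","c","d","e","1","2","3"],
     ["f","g","h","i","j","4","5","6"],
     ["k","l","m","n","o","7","8","9"],
     ["p","q","r","s","t",".","@","0"],
     ["u","v","w","x","y","z","_","/"]]
  pvScanRows c (pvEnumI 0 keyboard)

-- ===== PORT B =====
-- specials = {'.': [3,5], '@': [3,6], '0': [3,7], '_': [4,6], '/': [4,7]}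
def pvSpecials : PySem.Dict String (List Int) :=
  PySem.Dict.ofList [(".", [3, 5]), ("@", [3, 6]), ("0", [3, 7]), ("_", [4, 6]), ("/", [4, 7])]

-- the body after the len(c) == 1 check, on the single character (k = ord(c))
def pvAltChar (ch : Char) : List Int :=
  -- k = ord(c), as a Python int
  if 97 ≤ (ch.toNat : Int) ∧ (ch.toNat : Int) ≤ 116 then        -- ord('a') <= k <= ord('t'): divmod(k - 97, 5)
    [PySem.Int.floordiv ((ch.toNat : Int) - 97) 5, PySem.Int.mod ((ch.toNat : Int) - 97) 5]
  else if 117 ≤ (ch.toNat : Int) ∧ (ch.toNat : Int) ≤ 122 then  -- ord('u') <= k <= ord('z')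
    [4, (ch.toNat : Int) - 117]
  else if 49 ≤ (ch.toNat : Int) ∧ (ch.toNat : Int) ≤ 57 then    -- ord('1') <= k <= ord('9'): divmod(k - 49, 3)
    [PySem.Int.floordiv ((ch.toNat : Int) - 49) 3, 5 + PySem.Int.mod ((ch.toNat : Int) - 49) 3]
  else
    PySem.Dict.getD pvSpecials (String.ofList [ch]) [-1, -1]

def search_alt (c : String) : List Int :=
  match c.toList with
  | [ch] => pvAltChar ch              -- len(c) == 1
  | _ => [-1, -1]                      -- len(c) != 1

-- ===== PRECONDITION & SPEC =====
def Spec_search (c : String) (out : List Int) : Prop := out = search_alt c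
instance (c : String) (out : List Int) : Decidable (Spec_search c out) := by unfold Spec_search; infer_instance

-- ===== CLAIM (what is proved, stated in full; the proofs are below) =====
def Claim_equal_search : Prop := ∀ (c : String), Dom_search c → Spec_search c (search c)

-- ===== LEMMAS AND PROOFS =====

-- the 40 keys of the keyboard, row-major
def pvKeys40 : List String :=
  ["a","b","c","d","e","1","2","3","f","g","h","i","j","4","5","6",
   "k","l","m","n","o","7","8","9","p","q","r","s","t",".","@","0",
   "u","v","w","x","y","z","_","/"]

theorem char_eq_of_toNat_eq (a b : Char) (h : a.toNat = b.toNat) : a = b :=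
  Char.ext (UInt32.toNat_inj.mp h)

-- enumeration only pairs elements with indices: second components come from the list
theorem mem_pvEnumI_snd {α : Type} {p : Int × α} : ∀ {i : Int} {l : List α}, p ∈ pvEnumI i l → p.2 ∈ l := by
  intro i l
  induction l generalizing i with
  | nil => simp [pvEnumI]
  | cons x xs ih =>
      intro hp
      rcases (by simpa [pvEnumI] using hp : p = (i, x) ∨ p ∈ pvEnumI (i + 1) xs) with h | h
      · simp [h]
      · simp [ih h]

-- pvScanRow returns none when c matches no key of the (enumerated) row
theorem pvScanRow_miss (c : String) (i : Int) (l : List (Int × String))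
    (h : ∀ p ∈ l, c ≠ p.2) : pvScanRow c i l = none := by
  induction l with
  | nil => rfl
  | cons p rest ih =>
      obtain ⟨j, key⟩ := p
      simp only [pvScanRow]
      rw [if_neg (h (j, key) (by simp))]
      exact ih (fun q hq => h q (by simp [hq]))

-- pvScanRows falls through to [-1,-1] when c matches no key of any row
theorem pvScanRows_miss (c : String) (l : List (Int × List String))
    (h : ∀ p ∈ l, ∀ k ∈ p.2, c ≠ k) : pvScanRows c l = [-1, -1] := by
  induction l with
  | nil => rfl
  | cons p rest ih =>
      obtain ⟨i, row⟩ := p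
      simp only [pvScanRows]
      rw [pvScanRow_miss c i _ (fun q hq => h (i, row) (by simp) q.2 (mem_pvEnumI_snd hq))]
      exact ih (fun q hq => h q (by simp [hq]))

-- A returns [-1,-1] when c is none of the 40 keys
theorem search_miss (c : String) (h : c ∉ pvKeys40) : search c = [-1, -1] := by
  rw [search]
  apply pvScanRows_miss
  rintro ⟨i, row⟩ hp k hk e
  have hm := mem_pvEnumI_snd hp
  apply h
  rw [e]
  fin_cases hm <;> fin_cases hk <;> decide

-- B's per-character arithmetic returns [-1,-1] when the character is none of the 40 keys
theorem pvAltChar_miss (ch : Char) (h : String.ofList [ch] ∉ pvKeys40) : pvAltChar ch = [-1, -1] := by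
  unfold pvAltChar
  split_ifs with h1 h2 h3
  · exfalso
    rcases (by omega : ch.toNat = 97 ∨ ch.toNat = 98 ∨ ch.toNat = 99 ∨ ch.toNat = 100 ∨ ch.toNat = 101 ∨ ch.toNat = 102 ∨ ch.toNat = 103 ∨ ch.toNat = 104 ∨ ch.toNat = 105 ∨ ch.toNat = 106 ∨ ch.toNat = 107 ∨ ch.toNat = 108 ∨ ch.toNat = 109 ∨ ch.toNat = 110 ∨ ch.toNat = 111 ∨ ch.toNat = 112 ∨ ch.toNat = 113 ∨ ch.toNat = 114 ∨ ch.toNat = 115 ∨ ch.toNat = 116) with hv|hv|hv|hv|hv|hv|hv|hv|hv|hv|hv|hv|hv|hv|hv|hv|hv|hv|hv|hv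
    · exact h (by rw [show ch = 'a' from char_eq_of_toNat_eq _ _ (by rw [hv]; decide)]; decide)
    · exact h (by rw [show ch = 'b' from char_eq_of_toNat_eq _ _ (by rw [hv]; decide)]; decide)
    · exact h (by rw [show ch = 'c' from char_eq_of_toNat_eq _ _ (by rw [hv]; decide)]; decide)
    · exact h (by rw [show ch = 'd' from char_eq_of_toNat_eq _ _ (by rw [hv]; decide)]; decide)
    · exact h (by rw [show ch = 'e' from char_eq_of_toNat_eq _ _ (by rw [hv]; decide)]; decide)
    · exact h (by rw [show ch = 'f' from char_eq_of_toNat_eq _ _ (by rw [hv]; decide)]; decide)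
    · exact h (by rw [show ch = 'g' from char_eq_of_toNat_eq _ _ (by rw [hv]; decide)]; decide)
    · exact h (by rw [show ch = 'h' from char_eq_of_toNat_eq _ _ (by rw [hv]; decide)]; decide)
    · exact h (by rw [show ch = 'i' from char_eq_of_toNat_eq _ _ (by rw [hv]; decide)]; decide)
    · exact h (by rw [show ch = 'j' from char_eq_of_toNat_eq _ _ (by rw [hv]; decide)]; decide)
    · exact h (by rw [show ch = 'k' from char_eq_of_toNat_eq _ _ (by rw [hv]; decide)]; decide)
    · exact h (by rw [show ch = 'l' from char_eq_of_toNat_eq _ _ (by rw [hv]; decide)]; decide)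
    · exact h (by rw [show ch = 'm' from char_eq_of_toNat_eq _ _ (by rw [hv]; decide)]; decide)
    · exact h (by rw [show ch = 'n' from char_eq_of_toNat_eq _ _ (by rw [hv]; decide)]; decide)
    · exact h (by rw [show ch = 'o' from char_eq_of_toNat_eq _ _ (by rw [hv]; decide)]; decide)
    · exact h (by rw [show ch = 'p' from char_eq_of_toNat_eq _ _ (by rw [hv]; decide)]; decide)
    · exact h (by rw [show ch = 'q' from char_eq_of_toNat_eq _ _ (by rw [hv]; decide)]; decide)
    · exact h (by rw [show ch = 'r' from char_eq_of_toNat_eq _ _ (by rw [hv]; decide)]; decide)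
    · exact h (by rw [show ch = 's' from char_eq_of_toNat_eq _ _ (by rw [hv]; decide)]; decide)
    · exact h (by rw [show ch = 't' from char_eq_of_toNat_eq _ _ (by rw [hv]; decide)]; decide)
  · exfalso
    rcases (by omega : ch.toNat = 117 ∨ ch.toNat = 118 ∨ ch.toNat = 119 ∨ ch.toNat = 120 ∨ ch.toNat = 121 ∨ ch.toNat = 122) with hv|hv|hv|hv|hv|hv
    · exact h (by rw [show ch = 'u' from char_eq_of_toNat_eq _ _ (by rw [hv]; decide)]; decide)
    · exact h (by rw [show ch = 'v' from char_eq_of_toNat_eq _ _ (by rw [hv]; decide)]; decide)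
    · exact h (by rw [show ch = 'w' from char_eq_of_toNat_eq _ _ (by rw [hv]; decide)]; decide)
    · exact h (by rw [show ch = 'x' from char_eq_of_toNat_eq _ _ (by rw [hv]; decide)]; decide)
    · exact h (by rw [show ch = 'y' from char_eq_of_toNat_eq _ _ (by rw [hv]; decide)]; decide)
    · exact h (by rw [show ch = 'z' from char_eq_of_toNat_eq _ _ (by rw [hv]; decide)]; decide)
  · exfalso
    rcases (by omega : ch.toNat = 49 ∨ ch.toNat = 50 ∨ ch.toNat = 51 ∨ ch.toNat = 52 ∨ ch.toNat = 53 ∨ ch.toNat = 54 ∨ ch.toNat = 55 ∨ ch.toNat = 56 ∨ ch.toNat = 57) with hv|hv|hv|hv|hv|hv|hv|hv|hv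
    · exact h (by rw [show ch = '1' from char_eq_of_toNat_eq _ _ (by rw [hv]; decide)]; decide)
    · exact h (by rw [show ch = '2' from char_eq_of_toNat_eq _ _ (by rw [hv]; decide)]; decide)
    · exact h (by rw [show ch = '3' from char_eq_of_toNat_eq _ _ (by rw [hv]; decide)]; decide)
    · exact h (by rw [show ch = '4' from char_eq_of_toNat_eq _ _ (by rw [hv]; decide)]; decide)
    · exact h (by rw [show ch = '5' from char_eq_of_toNat_eq _ _ (by rw [hv]; decide)]; decide)
    · exact h (by rw [show ch = '6' from char_eq_of_toNat_eq _ _ (by rw [hv]; decide)]; decide)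
    · exact h (by rw [show ch = '7' from char_eq_of_toNat_eq _ _ (by rw [hv]; decide)]; decide)
    · exact h (by rw [show ch = '8' from char_eq_of_toNat_eq _ _ (by rw [hv]; decide)]; decide)
    · exact h (by rw [show ch = '9' from char_eq_of_toNat_eq _ _ (by rw [hv]; decide)]; decide)
  · have e0 : ("." == String.ofList [ch]) = false := by simp; exact fun e => h (by rw [← e]; decide)
    have e1 : ("@" == String.ofList [ch]) = false := by simp; exact fun e => h (by rw [← e]; decide)
    have e2 : ("0" == String.ofList [ch]) = false := by simp; exact fun e => h (by rw [← e]; decide)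
    have e3 : ("_" == String.ofList [ch]) = false := by simp; exact fun e => h (by rw [← e]; decide)
    have e4 : ("/" == String.ofList [ch]) = false := by simp; exact fun e => h (by rw [← e]; decide)
    simp [pvSpecials, PySem.Dict.getD, PySem.Dict.ofList, PySem.Dict.update, PySem.Dict.insert,
          PySem.Dict.get?, PySem.Dict.empty, List.find?, e0, e1, e2, e3, e4]

-- B returns [-1,-1] when c is none of the 40 keys
theorem search_alt_miss (c : String) (h : c ∉ pvKeys40) : search_alt c = [-1, -1] := by
  rcases hl : c.toList with _ | ⟨ch, _ | ⟨d, t⟩⟩ <;> simp only [search_alt, hl]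
  have hc : c = String.ofList [ch] := by rw [← hl, String.ofList_toList]
  exact pvAltChar_miss ch (hc ▸ h)

-- ===== VERDICT (by name: the statement is the Claim_ definition above) =====
theorem search_spec : Claim_equal_search := by
  intro c _
  unfold Spec_search
  by_cases h0 : c = "a"
  · subst h0; decide
  by_cases h1 : c = "b"
  · subst h1; decide
  by_cases h2 : c = "c"
  · subst h2; decide
  by_cases h3 : c = "d"
  · subst h3; decide
  by_cases h4 : c = "e"
  · subst h4; decide
  by_cases h5 : c = "1"
  · subst h5; decide
  by_cases h6 : c = "2"
  · subst h6; decide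
  by_cases h7 : c = "3"
  · subst h7; decide
  by_cases h8 : c = "f"
  · subst h8; decide
  by_cases h9 : c = "g"
  · subst h9; decide
  by_cases h10 : c = "h"
  · subst h10; decide
  by_cases h11 : c = "i"
  · subst h11; decide
  by_cases h12 : c = "j"
  · subst h12; decide
  by_cases h13 : c = "4"
  · subst h13; decide
  by_cases h14 : c = "5"
  · subst h14; decide
  by_cases h15 : c = "6"
  · subst h15; decide
  by_cases h16 : c = "k"
  · subst h16; decide
  by_cases h17 : c = "l"
  · subst h17; decide
  by_cases h18 : c = "m"
  · subst h18; decide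
  by_cases h19 : c = "n"
  · subst h19; decide
  by_cases h20 : c = "o"
  · subst h20; decide
  by_cases h21 : c = "7"
  · subst h21; decide
  by_cases h22 : c = "8"
  · subst h22; decide
  by_cases h23 : c = "9"
  · subst h23; decide
  by_cases h24 : c = "p"
  · subst h24; decide
  by_cases h25 : c = "q"
  · subst h25; decide
  by_cases h26 : c = "r"
  · subst h26; decide
  by_cases h27 : c = "s"
  · subst h27; decide
  by_cases h28 : c = "t"
  · subst h28; decide
  by_cases h29 : c = "."
  · subst h29; decide
  by_cases h30 : c = "@"
  · subst h30; decide
  by_cases h31 : c = "0"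
  · subst h31; decide
  by_cases h32 : c = "u"
  · subst h32; decide
  by_cases h33 : c = "v"
  · subst h33; decide
  by_cases h34 : c = "w"
  · subst h34; decide
  by_cases h35 : c = "x"
  · subst h35; decide
  by_cases h36 : c = "y"
  · subst h36; decide
  by_cases h37 : c = "z"
  · subst h37; decide
  by_cases h38 : c = "_"
  · subst h38; decide
  by_cases h39 : c = "/"
  · subst h39; decide
  -- c matches none of the 40 keys: both programs return [-1,-1]
  have hnot : c ∉ pvKeys40 := by
    simp only [pvKeys40, List.mem_cons, List.not_mem_nil, or_false]
    push Not
    exact ⟨h0, h1, h2, h3, h4, h5, h6, h7, h8, h9, h10, h11, h12, h13, h14, h15, h16, h17, h18, h19, h20, h21, h22, h23, h24, h25, h26, h27, h28, h29, h30, h31, h32, h33, h34, h35, h36, h37, h38, h39⟩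
  rw [search_miss c hnot, search_alt_miss c hnot]
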